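-- pv_equiv track=rewrite | github.com/valentingm1/pythonrepaso | template_t1.py | torneo_de_gallinas
-- ===== SOURCE A (Python) =====
-- def torneo_de_gallinas(strats: dict[str,str]) -> dict[str,int]:
--   scores = {jugador:0 for jugador in strats}
--   jugadores = list(strats.keys())
--
--     # Simular enfrentamientos sin duplicaciones
--   for i in range(len(jugadores)):
--         for j in range(i + 1, len(jugadores)):  # Solo jugadores posteriores
--             jugador1 = jugadores[i]
--             jugador2 = jugadores[j]
--             strat1 = strats[jugador1]
--             strat2 = strats[jugador2]
--
--             # Aplicar las reglas del enfrentamiento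
--             if strat1 == "me desvio siempre" and strat2 == "me desvio siempre":
--                 scores[jugador1] -= 10
--                 scores[jugador2] -= 10
--             elif strat1 == "me la banco y no me desvio" and strat2 == "me la banco y no me desvio":
--                 scores[jugador1] -= 5
--                 scores[jugador2] -= 5
--             elif strat1 == "me desvio siempre" and strat2 == "me la banco y no me desvio":
--                 scores[jugador1] -= 15
--                 scores[jugador2] += 10
--             elif strat1 == "me la banco y no me desvio" and strat2 == "me desvio siempre":
--                 scores[jugador1] += 10
--                 scores[jugador2] -= 15
--
--   return scores
-- ===== SOURCE B (Python) =====
-- def torneo_de_gallinas(strats: dict[str, str]) -> dict[str, int]: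
--     DESVIO = "me desvio siempre"
--     BANCO = "me la banco y no me desvio"
--     vals = list(strats.values())
--     nd = vals.count(DESVIO)
--     nb = vals.count(BANCO)
--     scores = {}
--     for jugador, s in strats.items():
--         if s == DESVIO:
--             scores[jugador] = -10 * (nd - 1) - 15 * nb
--         elif s == BANCO:
--             scores[jugador] = 10 * nd - 5 * (nb - 1)
--         else:
--             scores[jugador] = 0
--     return scores
-- ===== Notes on version B (the rewrite author's own statement) =====
-- stated objective: faster
-- what changed: B replaces A's O(n^2) simulation of every pairing by counting the players of each of the two named strategies once and computing every player's score directly from those two counts.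
import Mathlib
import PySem

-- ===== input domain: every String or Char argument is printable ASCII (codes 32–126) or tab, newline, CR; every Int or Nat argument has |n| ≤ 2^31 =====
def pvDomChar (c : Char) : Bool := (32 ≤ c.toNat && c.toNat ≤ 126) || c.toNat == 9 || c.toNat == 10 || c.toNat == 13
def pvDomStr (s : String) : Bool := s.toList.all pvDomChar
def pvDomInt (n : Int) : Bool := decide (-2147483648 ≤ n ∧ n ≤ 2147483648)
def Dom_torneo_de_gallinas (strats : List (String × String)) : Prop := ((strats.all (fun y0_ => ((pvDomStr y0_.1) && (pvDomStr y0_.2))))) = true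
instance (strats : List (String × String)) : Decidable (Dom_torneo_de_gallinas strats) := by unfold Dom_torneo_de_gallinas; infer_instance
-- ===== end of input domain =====

-- B replaces A's O(n^2) pairwise simulation by counting the two strategy types once and computing
-- each player's score from the counts in O(n) (objective: faster, asymptotic).

-- ===== PORT A =====
-- A-side helper: the exact if/elif chain of A's inner-loop body, applied to the two looked-up
-- strategies and the two player names.
def pvRules (strat1 strat2 jugador1 jugador2 : String)
    (scores : PySem.Dict String Int) : PySem.Dict String Int :=
  if strat1 = "me desvio siempre" ∧ strat2 = "me desvio siempre" then
    (scores.modify jugador1 0 (· - 10)).modify jugador2 0 (· - 10)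
  else if strat1 = "me la banco y no me desvio" ∧ strat2 = "me la banco y no me desvio" then
    (scores.modify jugador1 0 (· - 5)).modify jugador2 0 (· - 5)
  else if strat1 = "me desvio siempre" ∧ strat2 = "me la banco y no me desvio" then
    (scores.modify jugador1 0 (· - 15)).modify jugador2 0 (· + 10)
  else if strat1 = "me la banco y no me desvio" ∧ strat2 = "me desvio siempre" then
    (scores.modify jugador1 0 (· + 10)).modify jugador2 0 (· - 15)
  else scores

def torneo_de_gallinas (strats : List (String × String)) : List (String × Int) :=
  let d : PySem.Dict String String := PySem.Dict.ofList strats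
  let scores0 : PySem.Dict String Int := PySem.Dict.ofList (d.keys.map (fun jugador => (jugador, 0)))
  let jugadores := d.keys
  let n : Int := jugadores.length
  let final := (PySem.List.pyRange 0 n).foldl (fun scores i =>
    (PySem.List.pyRange (i + 1) n).foldl (fun scores j =>
      let jugador1 := PySem.List.pyGetD jugadores i ""
      let jugador2 := PySem.List.pyGetD jugadores j ""
      -- strats[jugador1]: the key is always present, so Python's d[k] is (d.get? k).getD ""
      let strat1 := (d.get? jugador1).getD ""
      let strat2 := (d.get? jugador2).getD ""
      pvRules strat1 strat2 jugador1 jugador2 scores) scores) scores0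
  final.items

-- ===== PORT B =====
def torneo_de_gallinas_alt (strats : List (String × String)) : List (String × Int) :=
  let d : PySem.Dict String String := PySem.Dict.ofList strats
  let vals := d.values
  let nd : Int := vals.count "me desvio siempre"
  let nb : Int := vals.count "me la banco y no me desvio"
  d.items.map (fun p =>
    (p.1, if p.2 = "me desvio siempre" then -10 * (nd - 1) - 15 * nb
          else if p.2 = "me la banco y no me desvio" then 10 * nd - 5 * (nb - 1)
          else 0))

-- ===== PRECONDITION & SPEC =====
def Spec_torneo_de_gallinas (strats : List (String × String)) (out : List (String × Int)) : Prop := out = torneo_de_gallinas_alt strats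
instance (strats : List (String × String)) (out : List (String × Int)) : Decidable (Spec_torneo_de_gallinas strats out) := by unfold Spec_torneo_de_gallinas; infer_instance

-- ===== CLAIM (what is proved, stated in full; the proofs are below) =====
def Claim_equal_torneo_de_gallinas : Prop := ∀ (strats : List (String × String)), Dom_torneo_de_gallinas strats → Spec_torneo_de_gallinas strats (torneo_de_gallinas strats)

-- ===== LEMMAS AND PROOFS =====

-- payoff of a player with strategy s facing a player with strategy t
def pvPay (s t : String) : Int :=
  if s = "me desvio siempre" ∧ t = "me desvio siempre" then -10
  else if s = "me la banco y no me desvio" ∧ t = "me la banco y no me desvio" then -5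
  else if s = "me desvio siempre" ∧ t = "me la banco y no me desvio" then -15
  else if s = "me la banco y no me desvio" ∧ t = "me desvio siempre" then 10
  else 0

-- one outer iteration of A: player x plays every later player in ys
def pvRow (x : String × String) (ys : List (String × String))
    (S : PySem.Dict String Int) : PySem.Dict String Int :=
  ys.foldl (fun S y => pvRules x.2 y.2 x.1 y.1 S) S

-- the whole double loop of A, as structural recursion over the items list
def pvLoop : List (String × String) → PySem.Dict String Int → PySem.Dict String Int
  | [], S => S
  | x :: rest, S => pvLoop rest (pvRow x rest S)

-- total amount A adds to the score of key k
def pvTot : List (String × String) → String → Int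
  | [], _ => 0
  | x :: rest, k =>
      (if k = x.1 then (rest.map (fun y => pvPay x.2 y.2)).sum else 0)
      + ((rest.filter (fun y => y.1 == k)).map (fun y => pvPay y.2 x.2)).sum
      + pvTot rest k

lemma pv_keys_modify_mem (S : PySem.Dict String Int) (k : String) (f : Int → Int)
    (h : k ∈ S.keys) : (S.modify k 0 f).keys = S.keys := by
  rw [PySem.Dict.keys_modify, PySem.Dict.keys_insert_of_contains]
  exact (PySem.Dict.contains_iff_mem_keys S k).mpr h

lemma pvRules_keys (s1 s2 j1 j2 : String) (S : PySem.Dict String Int)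
    (h1 : j1 ∈ S.keys) (h2 : j2 ∈ S.keys) :
    (pvRules s1 s2 j1 j2 S).keys = S.keys := by
  have one : ∀ f g : Int → Int, ((S.modify j1 0 f).modify j2 0 g).keys = S.keys := by
    intro f g
    rw [pv_keys_modify_mem _ j2 g (by rw [pv_keys_modify_mem _ j1 f h1]; exact h2),
      pv_keys_modify_mem _ j1 f h1]
  unfold pvRules
  split_ifs <;> first | rfl | exact one _ _

lemma pvRules_getD (s1 s2 j1 j2 : String) (S : PySem.Dict String Int) (k : String)
    (hne : j1 ≠ j2) :
    (pvRules s1 s2 j1 j2 S).getD k 0 =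
      S.getD k 0 + (if k = j1 then pvPay s1 s2 else 0) + (if k = j2 then pvPay s2 s1 else 0) := by
  unfold pvRules pvPay
  split_ifs <;> simp_all [PySem.Dict.getD_modify]
  all_goals omega

lemma pvRow_keys (x : String × String) (ys : List (String × String))
    (S : PySem.Dict String Int) (hx : x.1 ∈ S.keys) (hys : ∀ y ∈ ys, y.1 ∈ S.keys) :
    (pvRow x ys S).keys = S.keys := by
  induction ys generalizing S with
  | nil => rfl
  | cons y ys ih =>
      have hk := pvRules_keys x.2 y.2 x.1 y.1 S hx (hys y (by simp))
      simp only [pvRow, List.foldl_cons]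
      rw [show (ys.foldl (fun S y => pvRules x.2 y.2 x.1 y.1 S) (pvRules x.2 y.2 x.1 y.1 S)) = pvRow x ys (pvRules x.2 y.2 x.1 y.1 S) from rfl]
      rw [ih _ (hk ▸ hx) (fun z hz => hk ▸ hys z (by simp [hz]))]
      exact hk

lemma pvRow_getD (x : String × String) (ys : List (String × String))
    (S : PySem.Dict String Int) (k : String) (hx : x.1 ∉ ys.map (·.1)) :
    (pvRow x ys S).getD k 0 =
      S.getD k 0 + (if k = x.1 then (ys.map (fun y => pvPay x.2 y.2)).sum else 0)
        + ((ys.filter (fun y => y.1 == k)).map (fun y => pvPay y.2 x.2)).sum := by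
  induction ys generalizing S with
  | nil => simp [pvRow]
  | cons y ys ih =>
      have hxy : x.1 ≠ y.1 := by intro h; exact hx (by simp [h])
      simp only [pvRow, List.foldl_cons]
      rw [show (ys.foldl (fun S y => pvRules x.2 y.2 x.1 y.1 S) (pvRules x.2 y.2 x.1 y.1 S)) = pvRow x ys (pvRules x.2 y.2 x.1 y.1 S) from rfl]
      rw [ih _ (by intro h; exact hx (by simp at h ⊢; right; exact h))]
      rw [pvRules_getD x.2 y.2 x.1 y.1 S k hxy, List.filter_cons]
      by_cases hk2 : (y.1 == k) = true
      · have hy1 : y.1 = k := eq_of_beq hk2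
        have hk1 : ¬ k = x.1 := fun h => hxy (hy1.trans h).symm
        simp [hk1, hy1]
        ring
      · have hy1 : ¬ k = y.1 := fun h => hk2 (by simp [h])
        by_cases hk1 : k = x.1 <;>
          simp [hk2, hk1, hy1, hxy, Ne.symm hxy] <;> try ring
  
lemma pvLoop_keys (xs : List (String × String)) (S : PySem.Dict String Int)
    (h : ∀ x ∈ xs, x.1 ∈ S.keys) : (pvLoop xs S).keys = S.keys := by
  induction xs generalizing S with
  | nil => rfl
  | cons x xs ih =>
      have hr := pvRow_keys x xs S (h x (by simp)) (fun y hy => h y (by simp [hy]))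
      simp only [pvLoop]
      rw [ih _ (fun y hy => hr ▸ h y (by simp [hy]))]
      exact hr

lemma pvLoop_getD (xs : List (String × String)) (S : PySem.Dict String Int) (k : String)
    (hnd : (xs.map (·.1)).Nodup) :
    (pvLoop xs S).getD k 0 = S.getD k 0 + pvTot xs k := by
  induction xs generalizing S with
  | nil => simp [pvLoop, pvTot]
  | cons x xs ih =>
      simp only [List.map_cons, List.nodup_cons] at hnd
      simp only [pvLoop, pvTot]
      rw [ih _ hnd.2, pvRow_getD x xs S k hnd.1]
      ring

lemma pv_filter_eq_singleton (xs : List (String × String)) (k : String) (s : String)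
    (hnd : (xs.map (·.1)).Nodup) (hmem : (k, s) ∈ xs) :
    xs.filter (fun y => y.1 == k) = [(k, s)] := by
  induction xs with
  | nil => simp at hmem
  | cons x xs ih =>
      simp only [List.map_cons, List.nodup_cons] at hnd
      rcases List.mem_cons.mp hmem with h | h
      · subst h
        have hfil : xs.filter (fun y => y.1 == k) = [] := by
          apply List.filter_eq_nil_iff.mpr
          intro y hy hbeq
          exact hnd.1 (eq_of_beq hbeq ▸ List.mem_map_of_mem (f := fun p => p.1) hy)
        simp [hfil]
      · have hxk : ¬ (x.1 == k) = true := by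
          intro hbeq
          have hk : k ∈ xs.map (fun p => p.1) := List.mem_map_of_mem (f := fun p => p.1) h
          exact hnd.1 (by rw [eq_of_beq hbeq]; exact hk)
        simp only [List.filter_cons, if_neg hxk]
        exact ih hnd.2 h

lemma pvTot_not_mem (xs : List (String × String)) (k : String)
    (h : k ∉ xs.map (·.1)) : pvTot xs k = 0 := by
  induction xs with
  | nil => rfl
  | cons x xs ih =>
      simp only [List.map_cons, List.mem_cons, not_or] at h
      have hfil : xs.filter (fun y => y.1 == k) = [] := by
        apply List.filter_eq_nil_iff.mpr
        intro y hy hbeq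
        exact h.2 (eq_of_beq hbeq ▸ List.mem_map_of_mem (f := fun p => p.1) hy)
      simp [pvTot, hfil, ih h.2, h.1]

lemma pvTot_mem (xs : List (String × String)) (k s : String)
    (hnd : (xs.map (·.1)).Nodup) (hmem : (k, s) ∈ xs) :
    pvTot xs k = (xs.map (fun y => pvPay s y.2)).sum - pvPay s s := by
  induction xs with
  | nil => simp at hmem
  | cons x xs ih =>
      simp only [List.map_cons, List.nodup_cons] at hnd
      rcases List.mem_cons.mp hmem with h | h
      · subst h
        have hfil : xs.filter (fun y => y.1 == k) = [] := by
          apply List.filter_eq_nil_iff.mpr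
          intro y hy hbeq
          exact hnd.1 (eq_of_beq hbeq ▸ List.mem_map_of_mem (f := fun p => p.1) hy)
        simp [pvTot, hfil, pvTot_not_mem xs k hnd.1]
      · have hxk : k ≠ x.1 := by
          intro hkx
          have hk : k ∈ xs.map (fun p => p.1) := List.mem_map_of_mem (f := fun p => p.1) h
          exact hnd.1 (hkx ▸ hk)
        rw [show pvTot (x :: xs) k =
          (if k = x.1 then (xs.map (fun y => pvPay x.2 y.2)).sum else 0)
          + ((xs.filter (fun y => y.1 == k)).map (fun y => pvPay y.2 x.2)).sum + pvTot xs k from rfl]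
        rw [if_neg hxk, pv_filter_eq_singleton xs k s hnd.2 h, ih hnd.2 h]
        simp; ring

lemma pv_sum_pay (s : String) (xs : List (String × String)) :
    (xs.map (fun y => pvPay s y.2)).sum =
      pvPay s "me desvio siempre" * ((xs.map (·.2)).count "me desvio siempre" : Int)
      + pvPay s "me la banco y no me desvio" * ((xs.map (·.2)).count "me la banco y no me desvio" : Int) := by
  induction xs with
  | nil => simp
  | cons x xs ih =>
      simp only [List.map_cons, List.sum_cons, List.count_cons, ih]
      by_cases h1 : x.2 = "me desvio siempre" <;> by_cases h2 : x.2 = "me la banco y no me desvio" <;>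
        simp [h1, h2, pvPay] <;> split_ifs <;> simp_all <;> ring

-- the double index loop of A is pvLoop over d.items
lemma pv_inner_eq_row (d : PySem.Dict String String) (hnd : d.keys.Nodup)
    (x : String × String) (hx : (d.get? x.1).getD "" = x.2) :
    ∀ (m b : Nat), d.items.length - b = m → ∀ S,
      (PySem.List.pyRange (b : Int) (d.keys.length : Int)).foldl (fun scores j =>
        let jugador2 := PySem.List.pyGetD d.keys j ""
        pvRules ((d.get? x.1).getD "") ((d.get? jugador2).getD "") x.1 jugador2 scores) S
      = pvRow x (d.items.drop b) S := by
  intro m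
  induction m with
  | zero =>
      intro b hb S
      have hlen : d.items.length ≤ b := by omega
      have hkeys : d.keys.length = d.items.length := by
        simp [PySem.Dict.keys]
      rw [show PySem.List.pyRange (b : Int) (d.keys.length : Int) = [] by
        simp [PySem.List.pyRange]; omega]
      rw [List.drop_eq_nil_of_le hlen]
      rfl
  | succ m ih =>
      intro b hb S
      have hkeys : d.keys.length = d.items.length := by simp [PySem.Dict.keys]
      have hblt : b < d.items.length := by omega
      rw [PySem.List.pyRange_one_cons (by exact_mod_cast hkeys ▸ hblt)]
      rw [List.foldl_cons]
      have hget : PySem.List.pyGetD d.keys (b : Int) "" = (d.items[b]'hblt).1 := by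
        rw [PySem.List.pyGetD_eq_getElem d.keys "" (by positivity) (by exact_mod_cast hkeys ▸ hblt)]
        simp [PySem.Dict.keys]
      have hstrat : (d.get? (d.items[b]'hblt).1).getD "" = (d.items[b]'hblt).2 := by
        have hmem : ((d.items[b]'hblt).1, (d.items[b]'hblt).2) ∈ d.items :=
          Prod.mk.eta.symm ▸ List.getElem_mem hblt
        rw [PySem.Dict.get?_of_mem_items d hmem hnd]
        rfl
      rw [show ((b : Int) + 1) = ((b + 1 : Nat) : Int) by push_cast; ring]
      rw [ih (b + 1) (by omega)]
      rw [List.drop_eq_getElem_cons hblt]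
      simp only [pvRow, List.foldl_cons, hget, hstrat, hx]
  
lemma pv_outer_eq_loop (d : PySem.Dict String String) (hnd : d.keys.Nodup) :
    ∀ (m a : Nat), d.items.length - a = m → ∀ S,
      (PySem.List.pyRange (a : Int) (d.keys.length : Int)).foldl (fun scores i =>
        (PySem.List.pyRange (i + 1) (d.keys.length : Int)).foldl (fun scores j =>
          let jugador1 := PySem.List.pyGetD d.keys i ""
          let jugador2 := PySem.List.pyGetD d.keys j ""
          pvRules ((d.get? jugador1).getD "") ((d.get? jugador2).getD "") jugador1 jugador2 scores) scores) S
      = pvLoop (d.items.drop a) S := by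
  intro m
  induction m with
  | zero =>
      intro a ha S
      have hkeys : d.keys.length = d.items.length := by simp [PySem.Dict.keys]
      rw [show PySem.List.pyRange (a : Int) (d.keys.length : Int) = [] by
        simp [PySem.List.pyRange]; omega]
      rw [List.drop_eq_nil_of_le (by omega)]
      rfl
  | succ m ih =>
      intro a ha S
      have hkeys : d.keys.length = d.items.length := by simp [PySem.Dict.keys]
      have halt : a < d.items.length := by omega
      rw [PySem.List.pyRange_one_cons (by exact_mod_cast hkeys ▸ halt)]
      rw [List.foldl_cons]
      have hget : PySem.List.pyGetD d.keys (a : Int) "" = (d.items[a]'halt).1 := by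
        rw [PySem.List.pyGetD_eq_getElem d.keys "" (by positivity) (by exact_mod_cast hkeys ▸ halt)]
        simp [PySem.Dict.keys]
      have hstrat : (d.get? (d.items[a]'halt).1).getD "" = (d.items[a]'halt).2 := by
        have hmem : ((d.items[a]'halt).1, (d.items[a]'halt).2) ∈ d.items :=
          Prod.mk.eta.symm ▸ List.getElem_mem halt
        rw [PySem.Dict.get?_of_mem_items d hmem hnd]
        rfl
      simp only [hget]
      rw [show ((a : Int) + 1) = ((a + 1 : Nat) : Int) by push_cast; ring]
      rw [pv_inner_eq_row d hnd (d.items[a]'halt) hstrat (d.items.length - (a + 1)) (a + 1) rfl S]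
      rw [ih (a + 1) (by omega)]
      rw [List.drop_eq_getElem_cons halt]
      rfl

-- scores0 = {jugador: 0 for jugador in strats}
lemma pv_scores0_items (d : PySem.Dict String String) (hnd : d.keys.Nodup) :
    (PySem.Dict.ofList (d.keys.map (fun jugador => (jugador, (0 : Int))))).items
      = d.keys.map (fun jugador => (jugador, (0 : Int))) := by
  have := PySem.Dict.items_foldl_insert_fresh (d.keys.map (fun jugador => (jugador, (0 : Int))))
    Prod.fst Prod.snd PySem.Dict.empty (by simp) (by simpa [Function.comp_def] using hnd)
  simpa [PySem.Dict.ofList, PySem.Dict.update] using this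

-- ===== VERDICT (by name: the statement is the Claim_ definition above) =====
theorem torneo_de_gallinas_spec : Claim_equal_torneo_de_gallinas := by
  intro strats _
  unfold Spec_torneo_de_gallinas torneo_de_gallinas torneo_de_gallinas_alt
  set d : PySem.Dict String String := PySem.Dict.ofList strats with hd
  have hnd : d.keys.Nodup := PySem.Dict.nodup_keys_ofList strats
  have hndi : (d.items.map (·.1)).Nodup := by simpa [PySem.Dict.keys] using hnd
  simp only []
  set scores0 : PySem.Dict String Int := PySem.Dict.ofList (d.keys.map (fun jugador => (jugador, 0))) with hs0
  have hitems0 : scores0.items = d.keys.map (fun jugador => (jugador, (0 : Int))) :=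
    pv_scores0_items d hnd
  have hkeys0 : scores0.keys = d.keys := by
    simp [PySem.Dict.keys, hitems0, List.map_map, Function.comp]
  have hnd0 : scores0.keys.Nodup := hkeys0 ▸ hnd
  -- the double loop is pvLoop d.items scores0
  have houter := pv_outer_eq_loop d hnd d.items.length 0 (by simp) scores0
  rw [Nat.cast_zero, List.drop_zero] at houter
  rw [houter]
  -- keys of the final dict
  have hkeysF : (pvLoop d.items scores0).keys = d.keys := by
    rw [pvLoop_keys d.items scores0 (fun x hx => hkeys0 ▸ PySem.Dict.mem_keys_of_mem_items d hx)]
    exact hkeys0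
  have hndF : (pvLoop d.items scores0).keys.Nodup := hkeysF ▸ hnd
  rw [PySem.Dict.items_eq_map_keys _ hndF 0, hkeysF]
  -- pointwise values
  rw [show d.keys = d.items.map (·.1) from by simp [PySem.Dict.keys], List.map_map]
  apply List.map_congr_left
  intro y hy
  simp only [Function.comp]
  have hgd0 : scores0.getD y.1 0 = 0 := by
    apply PySem.Dict.getD_of_mem_items
    · rw [hitems0]
      exact List.mem_map_of_mem (PySem.Dict.mem_keys_of_mem_items d hy)
    · exact hnd0
  rw [pvLoop_getD d.items scores0 y.1 hndi, hgd0,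
    pvTot_mem d.items y.1 y.2 hndi (by simpa using hy), pv_sum_pay]
  have hvals : d.values = d.items.map (·.2) := by simp [PySem.Dict.values]
  rw [hvals]
  by_cases h1 : y.2 = "me desvio siempre" <;> by_cases h2 : y.2 = "me la banco y no me desvio" <;>
    simp [h1, h2, pvPay] <;> ring
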